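-- pv_equiv track=rewrite | github.com/IYT-E/ABC | DP.py | find_max_dp
-- ===== SOURCE A (Python) =====
-- def find_max_dp(num_list, limit): #リスト、指定数
--     list_len = len(num_list)
--     #2次元配列の生成、縦方向にカードの数、横方向に指定数 指定数は10だとすると0スタートなので＋1の11箇所必要
--     dp_table = [[0 for j in range(limit + 1)] for i in range(list_len)]
--
--     # 1番目のカード
--     for j in range(limit + 1):
--         # 1番目のカードを追加 縦0の横方向の指定数リストを0から見ていって該当の数字以上はすべてその数字で埋める
--         if num_list[0] <= j:
--             dp_table[0][j] = list[0]
--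
--     # 2番目以降のカード
--     #縦方向
--     for i in range(list_len):
--         #横方向
--         for j in range(limit + 1):
--             # ひとつ前のカードを参照 1枚めはリストの−1なので最後のカードを参照するが全部0なので問題ない tmpは0になる
--             tmp_not_choice = dp_table[i-1][j]
--             if num_list[i] > j: # コスト不足のとき 1枚めは普通に同じ数で更新するだけ
--                 dp_table[i][j] = tmp_not_choice
--             else:
--                 tmp_choice = dp_table[i-1][j - num_list[i]] + num_list[i]
--                 dp_table[i][j] = max(tmp_choice,tmp_not_choice)
--
--     return dp_table[list_len - 1][limit]
--
-- list = [4,2,9,7,5,6] #実際に与えるリスト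
-- ===== SOURCE B (Python) =====
-- def find_max_dp(num_list, limit):
--     # Reachable-subset-sums set DP: keep the set of achievable sums <= limit.
--     sums = {0}
--     for n in num_list:
--         sums |= {s + n for s in sums if s + n <= limit}
--     return max(sums)
-- ===== Notes on version B (the rewrite author's own statement) =====
-- stated objective: alternative
-- what changed: Replaces A's (list_len)x(limit+1) bottom-up DP table (plus its buggy first-row pass) by a single left-to-right fold that maintains the set of reachable subset sums not exceeding the limit and returns its maximum.
-- intended difference: On single-element lists [n] with n <= limit and (n < 4 or 2n <= limit), A returns an inflated value built from the module-level 'list[0]' = 4 and from re-reading the row it is writing (e.g. 4 for ([0], 0)); B returns the true best subset sum not exceeding the limit, which is what the function is for. — e.g. on find_max_dp([0], 0): A returns 4, B returns 0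
import Mathlib
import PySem

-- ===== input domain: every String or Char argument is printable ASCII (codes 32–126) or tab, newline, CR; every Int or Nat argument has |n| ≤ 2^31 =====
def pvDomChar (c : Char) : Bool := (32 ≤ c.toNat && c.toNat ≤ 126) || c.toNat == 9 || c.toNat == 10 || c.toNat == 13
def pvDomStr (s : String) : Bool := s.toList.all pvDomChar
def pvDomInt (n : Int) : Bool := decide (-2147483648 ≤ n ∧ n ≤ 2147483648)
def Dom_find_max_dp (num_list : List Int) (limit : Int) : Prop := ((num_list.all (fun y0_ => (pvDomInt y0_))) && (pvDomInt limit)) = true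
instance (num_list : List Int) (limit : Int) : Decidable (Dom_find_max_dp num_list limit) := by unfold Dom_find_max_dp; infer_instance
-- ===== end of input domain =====

-- B replaces A's 2D table DP by a one-pass reachable-subset-sums set; A's single-element answers
-- (corrupted by the module-level 'list') are stated as an intended difference D_ below.

-- ===== PORT A =====
-- the module-level 'list = [4,2,9,7,5,6]' that A's first loop reads via 'list[0]'
def pyModuleList : List Int := [4, 2, 9, 7, 5, 6]

-- one iteration of A's inner j-loop (the body of 'for j in range(limit+1)' inside 'for i in range(list_len)')
def aCell (num_list : List Int) (dp : List (List Int)) (i j : Int) : List (List Int) :=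
  let tmp_not_choice := PySem.List.pyGetD (PySem.List.pyGetD dp (i - 1) []) j 0
  if PySem.List.pyGetD num_list i 0 > j then
    PySem.List.pySetD dp i (PySem.List.pySetD (PySem.List.pyGetD dp i []) j tmp_not_choice)
  else
    let tmp_choice := PySem.List.pyGetD (PySem.List.pyGetD dp (i - 1) []) (j - PySem.List.pyGetD num_list i 0) 0 + PySem.List.pyGetD num_list i 0
    PySem.List.pySetD dp i (PySem.List.pySetD (PySem.List.pyGetD dp i []) j (max tmp_choice tmp_not_choice))

def find_max_dp (num_list : List Int) (limit : Int) : Int :=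
  let list_len : Int := (num_list.length : Int)
  let dp_table : List (List Int) :=
    (PySem.List.pyRange 0 list_len 1).map (fun _ => (PySem.List.pyRange 0 (limit + 1) 1).map (fun _ => (0 : Int)))
  -- 1st loop: dp_table[0][j] = list[0]  (the GLOBAL 'list', i.e. 4)
  let dp1 :=
    (PySem.List.pyRange 0 (limit + 1) 1).foldl (fun dp j =>
      if PySem.List.pyGetD num_list 0 0 ≤ j then
        PySem.List.pySetD dp 0 (PySem.List.pySetD (PySem.List.pyGetD dp 0 []) j (PySem.List.pyGetD pyModuleList 0 0))
      else dp) dp_table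
  -- 2nd (nested) loops
  let dp2 :=
    (PySem.List.pyRange 0 list_len 1).foldl (fun dp i =>
      (PySem.List.pyRange 0 (limit + 1) 1).foldl (fun dp j => aCell num_list dp i j) dp) dp1
  PySem.List.pyGetD (PySem.List.pyGetD dp2 (list_len - 1) []) limit 0

-- ===== PORT B =====
def find_max_dp_alt (num_list : List Int) (limit : Int) : Int :=
  let sums : PySem.Set Int :=
    num_list.foldl (fun sums n =>
      PySem.Set.union sums
        (PySem.Set.ofList ((sums.filter (fun s => s + n ≤ limit)).map (fun s => s + n))))
      (PySem.Set.ofList [(0 : Int)])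
  (PySem.List.max? sums (fun y => y)).getD 0

-- ===== PRECONDITION & SPEC =====
-- Pre_ excludes exactly the inputs where A raises IndexError: the empty list, a negative limit
-- (every dp row is then empty), and any negative element (dp_table[i-1][j - num_list[i]] overflows the row).
def Pre_find_max_dp (num_list : List Int) (limit : Int) : Prop :=
  num_list ≠ [] ∧ 0 ≤ limit ∧ ∀ x ∈ num_list, 0 ≤ x
instance (num_list : List Int) (limit : Int) : Decidable (Pre_find_max_dp num_list limit) := by
  unfold Pre_find_max_dp; infer_instance

def pvWitness_find_max_dp : List Int × Int := ([4, 2, 9, 7, 5, 6], 10)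

-- On single-element lists [n] with n ≤ limit and (n < 4 or 2n ≤ limit), A's first loop seeds the
-- table with the module-level 'list[0]' = 4 instead of n and its i-1 trick reads the row being
-- written, so A returns an inflated value (e.g. 4 for ([0], 0)); B returns the true best subset
-- sum not exceeding the limit, which is what the function is for.
def D_find_max_dp (num_list : List Int) (limit : Int) : Prop :=
  num_list.length = 1 ∧ num_list.headD 0 ≤ limit ∧
    (num_list.headD 0 < 4 ∨ 2 * num_list.headD 0 ≤ limit)
instance (num_list : List Int) (limit : Int) : Decidable (D_find_max_dp num_list limit) := by
  unfold D_find_max_dp; infer_instance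

def Spec_find_max_dp (num_list : List Int) (limit : Int) (out : Int) : Prop :=
  ¬ D_find_max_dp num_list limit → out = find_max_dp_alt num_list limit
instance (num_list : List Int) (limit : Int) (out : Int) : Decidable (Spec_find_max_dp num_list limit out) := by
  unfold Spec_find_max_dp; infer_instance

def pvDiffWitness_find_max_dp : List Int × Int := ([0], 0)
def pvDiffWitnessOut_find_max_dp : Int × Int := (4, 0)

-- ===== CLAIM (what is proved, stated in full; the proofs are below) =====
def Claim_unchanged_find_max_dp : Prop := ∀ (num_list : List Int) (limit : Int), Dom_find_max_dp num_list limit → Pre_find_max_dp num_list limit → Spec_find_max_dp num_list limit (find_max_dp num_list limit)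
def Claim_changed_find_max_dp : Prop := Dom_find_max_dp (pvDiffWitness_find_max_dp.1) (pvDiffWitness_find_max_dp.2) ∧ Pre_find_max_dp (pvDiffWitness_find_max_dp.1) (pvDiffWitness_find_max_dp.2) ∧ D_find_max_dp (pvDiffWitness_find_max_dp.1) (pvDiffWitness_find_max_dp.2) ∧ find_max_dp (pvDiffWitness_find_max_dp.1) (pvDiffWitness_find_max_dp.2) = pvDiffWitnessOut_find_max_dp.1 ∧ find_max_dp_alt (pvDiffWitness_find_max_dp.1) (pvDiffWitness_find_max_dp.2) = pvDiffWitnessOut_find_max_dp.2 ∧ pvDiffWitnessOut_find_max_dp.1 ≠ pvDiffWitnessOut_find_max_dp.2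
def Claim_exact_find_max_dp : Prop := ∀ (num_list : List Int) (limit : Int), Dom_find_max_dp num_list limit → Pre_find_max_dp num_list limit → D_find_max_dp num_list limit → find_max_dp num_list limit ≠ find_max_dp_alt num_list limit

-- ===== LEMMAS AND PROOFS =====

-- ---- B side: reachable subset sums ----

-- s is the sum of some sub-selection of xs
def sReach (xs : List Int) (s : Int) : Prop := ∃ t : List Int, t.Sublist xs ∧ t.sum = s

lemma sReach_zero (xs : List Int) : sReach xs 0 := ⟨[], List.nil_sublist xs, rfl⟩

lemma sReach_nonneg {xs : List Int} {s : Int} (h : ∀ x ∈ xs, 0 ≤ x) (hr : sReach xs s) : 0 ≤ s := by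
  rcases hr with ⟨t, ht, rfl⟩
  exact List.sum_nonneg (fun x hx => h x (ht.subset hx))

lemma sReach_append_iff {p : List Int} {n s : Int} :
    sReach (p ++ [n]) s ↔ sReach p s ∨ ∃ s0, sReach p s0 ∧ s = s0 + n := by
  constructor
  · rintro ⟨t, ht, rfl⟩
    rcases List.sublist_append_iff.mp ht with ⟨t1, t2, rfl, h1, h2⟩
    rcases List.sublist_singleton.mp h2 with rfl | rfl
    · exact Or.inl ⟨t1, by simpa using h1, by simp⟩
    · exact Or.inr ⟨t1.sum, ⟨t1, h1, rfl⟩, by simp⟩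
  · rintro (⟨t, ht, rfl⟩ | ⟨s0, ⟨t, ht, rfl⟩, rfl⟩)
    · exact ⟨t, ht.trans (List.sublist_append_left _ _), rfl⟩
    · exact ⟨t ++ [n], ht.append (List.Sublist.refl _), by simp⟩

-- the shared DP recurrence: best subset sum of the first i elements not exceeding j
def knapT (nums : List Int) : Nat → Int → Int
  | 0, _ => 0
  | (i+1), j =>
    let n := nums.getD i 0
    if n > j then knapT nums i j
    else max (knapT nums i (j - n) + n) (knapT nums i j)

lemma knapT_succ (nums : List Int) (i : Nat) (j : Int) :
    knapT nums (i+1) j = if nums.getD i 0 > j then knapT nums i j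
      else max (knapT nums i (j - nums.getD i 0) + nums.getD i 0) (knapT nums i j) := by
  rw [knapT]

lemma knapT_reach {nums : List Int} (hnn : ∀ x ∈ nums, 0 ≤ x) :
    ∀ i, i ≤ nums.length → ∀ j : Int, 0 ≤ j →
      sReach (nums.take i) (knapT nums i j) ∧ knapT nums i j ≤ j := by
  intro i
  induction i with
  | zero => intro _ j hj; exact ⟨sReach_zero _, by simpa [knapT] using hj⟩
  | succ i ih =>
    intro hi j hj
    have hilt : i < nums.length := by omega
    have hget : nums.getD i 0 = nums[i] := by simp [List.getD_eq_getElem?_getD, List.getElem?_eq_getElem hilt]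
    have hn0 : 0 ≤ nums[i] := hnn _ (List.getElem_mem hilt)
    have htake : nums.take (i+1) = nums.take i ++ [nums[i]] := List.take_succ_eq_append_getElem hilt
    rcases ih (by omega) j hj with ⟨hr1, hle1⟩
    by_cases hgt : nums.getD i 0 > j
    · refine ⟨?_, ?_⟩
      · rw [knapT, if_pos hgt]
        rw [htake]; exact (sReach_append_iff).mpr (Or.inl hr1)
      · rw [knapT, if_pos hgt]; exact hle1
    · push Not at hgt
      rcases ih (by omega) (j - nums.getD i 0) (by omega) with ⟨hr2, hle2⟩
      constructor
      · rw [knapT, if_neg (by omega)]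
        rw [htake]
        rcases max_cases (knapT nums i (j - nums.getD i 0) + nums.getD i 0) (knapT nums i j) with ⟨heq, _⟩ | ⟨heq, _⟩
        · refine (sReach_append_iff).mpr (Or.inr ⟨knapT nums i (j - nums.getD i 0), ?_, ?_⟩)
          · exact hr2
          · rw [heq, hget]
        · exact (sReach_append_iff).mpr (Or.inl (by rw [heq]; exact hr1))
      · rw [knapT, if_neg (by omega)]
        have := hle2
        omega
  
lemma knapT_ub {nums : List Int} (hnn : ∀ x ∈ nums, 0 ≤ x) :
    ∀ i, i ≤ nums.length → ∀ j s : Int, sReach (nums.take i) s → s ≤ j → s ≤ knapT nums i j := by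
  intro i
  induction i with
  | zero =>
    intro _ j s hr hs
    have : s = 0 := by
      rcases hr with ⟨t, ht, rfl⟩
      simp [List.sublist_nil.mp (by simpa using ht)]
    simp [knapT]; omega
  | succ i ih =>
    intro hi j s hr hs
    have hilt : i < nums.length := by omega
    have hget : nums.getD i 0 = nums[i] := by simp [List.getD_eq_getElem?_getD, List.getElem?_eq_getElem hilt]
    have hn0 : 0 ≤ nums[i] := hnn _ (List.getElem_mem hilt)
    have htake : nums.take (i+1) = nums.take i ++ [nums[i]] := List.take_succ_eq_append_getElem hilt
    rw [htake] at hr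
    have hnnt : ∀ x ∈ nums.take i, 0 ≤ x := fun x hx => hnn x (List.mem_of_mem_take hx)
    rcases (sReach_append_iff).mp hr with hr1 | ⟨s0, hr0, rfl⟩
    · by_cases hgt : nums.getD i 0 > j
      · rw [knapT, if_pos hgt]; exact ih (by omega) j s hr1 hs
      · rw [knapT, if_neg hgt]
        exact le_max_of_le_right (ih (by omega) j s hr1 hs)
    · have hs0 : 0 ≤ s0 := sReach_nonneg hnnt hr0
      by_cases hgt : nums.getD i 0 > j
      · rw [hget] at hgt; omega
      · rw [knapT, if_neg hgt]
        refine le_max_of_le_left ?_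
        have : s0 ≤ knapT nums i (j - nums.getD i 0) := ih (by omega) _ s0 hr0 (by rw [hget] at *; omega)
        rw [hget] at *; omega
lemma bFold_mem (limit : Int) :
    ∀ (xs p : List Int) (S : PySem.Set Int),
      (∀ x ∈ xs, 0 ≤ x) →
      (∀ s : Int, s ∈ S ↔ sReach p s ∧ s ≤ limit) →
      ∀ s : Int,
        s ∈ xs.foldl (fun sums n =>
              PySem.Set.union sums
                (PySem.Set.ofList ((sums.filter (fun s => s + n ≤ limit)).map (fun s => s + n)))) S ↔
          sReach (p ++ xs) s ∧ s ≤ limit := by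
  intro xs
  induction xs with
  | nil => intro p S _ hS s; simpa using hS s
  | cons n xs ih =>
    intro p S hnn hS s
    rw [List.foldl_cons]
    have hstep : ∀ s : Int,
        s ∈ PySem.Set.union S
              (PySem.Set.ofList ((S.filter (fun s => s + n ≤ limit)).map (fun s => s + n))) ↔
          sReach (p ++ [n]) s ∧ s ≤ limit := by
      intro s
      rw [PySem.Set.mem_union, PySem.Set.mem_ofList]
      constructor
      · rintro (hmem | hmem)
        · rcases (hS s).mp hmem with ⟨hr, hle⟩
          exact ⟨sReach_append_iff.mpr (Or.inl hr), hle⟩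
        · rcases List.mem_map.mp hmem with ⟨s0, hs0, rfl⟩
          rcases List.mem_filter.mp hs0 with ⟨hs0S, hcond⟩
          rcases (hS s0).mp hs0S with ⟨hr0, _⟩
          exact ⟨sReach_append_iff.mpr (Or.inr ⟨s0, hr0, rfl⟩), by simpa using hcond⟩
      · rintro ⟨hr, hle⟩
        rcases sReach_append_iff.mp hr with hr1 | ⟨s0, hr0, rfl⟩
        · exact Or.inl ((hS s).mpr ⟨hr1, hle⟩)
        · refine Or.inr (List.mem_map.mpr ⟨s0, List.mem_filter.mpr ⟨?_, by simpa using hle⟩, rfl⟩)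
          have hn0 : (0:Int) ≤ n := hnn n List.mem_cons_self
          have hp : ∀ x ∈ p, True := fun _ _ => trivial
          exact (hS s0).mpr ⟨hr0, by
            have := sReach_nonneg (xs := p) (s := s0)
            -- s0 = s - n ≤ s ≤ limit since 0 ≤ n
            omega⟩
    have := ih (p ++ [n])
      (PySem.Set.union S ((S.filter (fun s => s + n ≤ limit)).map (fun s => s + n) |> PySem.Set.ofList))
      (fun x hx => hnn x (List.mem_cons_of_mem _ hx)) hstep s
    simpa using this

lemma B_eq_knapT {nums : List Int} {limit : Int}
    (hnn : ∀ x ∈ nums, 0 ≤ x) (hl : 0 ≤ limit) :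
    find_max_dp_alt nums limit = knapT nums nums.length limit := by
  unfold find_max_dp_alt
  have hbase : ∀ s : Int, s ∈ PySem.Set.ofList [(0:Int)] ↔ sReach [] s ∧ s ≤ limit := by
    intro s
    rw [PySem.Set.mem_ofList]
    constructor
    · intro h; rcases List.mem_singleton.mp h with rfl; exact ⟨sReach_zero _, hl⟩
    · rintro ⟨⟨t, ht, rfl⟩, _⟩
      simp [List.sublist_nil.mp ht]
  have hmem := bFold_mem limit nums [] (PySem.Set.ofList [(0:Int)]) hnn hbase
  simp only [List.nil_append] at hmem
  set S := nums.foldl (fun sums n =>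
      PySem.Set.union sums
        (PySem.Set.ofList ((sums.filter (fun s => s + n ≤ limit)).map (fun s => s + n))))
      (PySem.Set.ofList [(0:Int)]) with hSdef
  have h0 : (0:Int) ∈ S := (hmem 0).mpr ⟨sReach_zero _, hl⟩
  have hne : S ≠ [] := fun h => by simp [h] at h0
  rcases Option.ne_none_iff_exists'.mp (fun h => hne ((PySem.List.max?_eq_none_iff S (fun y : Int => y)).mp h)) with ⟨m, hm⟩
  have hmmem : m ∈ S := PySem.List.max?_mem hm
  have hmax : ∀ y ∈ S, y ≤ m := fun y hy => PySem.List.max?_isMax hm y hy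
  rcases (hmem m).mp hmmem with ⟨hrm, hlem⟩
  have h1 : m ≤ knapT nums nums.length limit := by
    refine knapT_ub hnn nums.length le_rfl limit m ?_ hlem
    simpa [List.take_length] using hrm
  have h2 : knapT nums nums.length limit ≤ m := by
    refine hmax _ ((hmem _).mpr ⟨?_, ?_⟩)
    · simpa [List.take_length] using (knapT_reach hnn nums.length le_rfl limit hl).1
    · exact (knapT_reach hnn nums.length le_rfl limit hl).2
  show (PySem.List.max? S (fun y => y)).getD 0 = knapT nums nums.length limit
  rw [hm]
  simp only [Option.getD_some]
  omega
-- ---- A side: table analysis ----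

-- value A's first loop leaves in cell (0, t): the module-level list's 4 where num_list[0] ≤ t
def init4 (n0 t : Int) : Int := if n0 ≤ t then 4 else 0

-- the value A's self-referencing single-row pass (len = 1, dp_table[-1] is the row being written) leaves in cell t
def selfF (n0 : Int) (t : Nat) : Int :=
  if n0 > (t : Int) then init4 n0 t
  else if n0 ≤ 0 then max (init4 n0 t + n0) (init4 n0 t)
  else max (selfF n0 (t - n0.toNat) + n0) (init4 n0 t)
termination_by t
decreasing_by
  rename_i h1 h2
  simp at h1
  omega

lemma foldl_pyRange_zero_cast {β : Type} (b : Int) (f : β → Int → β) (init : β) :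
    (PySem.List.pyRange 0 b 1).foldl f init
      = (List.range b.toNat).foldl (fun acc (k : Nat) => f acc (k : Int)) init := by
  rw [PySem.List.pyRange_one]
  simp [List.foldl_map]

lemma pvGetD_set {α : Type} (l : List α) (i j : Nat) (a d : α) :
    (l.set i a).getD j d = if i = j ∧ i < l.length then a else l.getD j d := by
  simp only [List.getD_eq_getElem?_getD, List.getElem?_set]
  split_ifs with h1 h2 h3 <;> simp_all <;> omega

lemma passA_distinct (nums : List Int) (w L i : Nat) (dp : List (List Int)) (R : List Int)
    (hL : dp.length = L) (hiL : i < L)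
    (hrowlen : (dp.getD i []).length = w)
    (hread : ∀ dp' : List (List Int), dp'.length = L →
        (∀ k, k ≠ i → dp'.getD k [] = dp.getD k []) →
        PySem.List.pyGetD dp' ((i : Int) - 1) [] = R)
    (hg : ∀ t, t < w → R.getD t 0 = knapT nums i (t : Int))
    (hn : 0 ≤ nums.getD i 0) :
    ∀ m, m ≤ w →
      ((List.range m).foldl (fun dp (k : Nat) => aCell nums dp (i : Int) (k : Int)) dp).length = L ∧
      (∀ k, k ≠ i → ((List.range m).foldl (fun dp (k : Nat) => aCell nums dp (i : Int) (k : Int)) dp).getD k []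
          = dp.getD k []) ∧
      (((List.range m).foldl (fun dp (k : Nat) => aCell nums dp (i : Int) (k : Int)) dp).getD i []).length = w ∧
      (∀ t, t < w → (((List.range m).foldl (fun dp (k : Nat) => aCell nums dp (i : Int) (k : Int)) dp).getD i []).getD t 0 =
          if t < m then knapT nums (i+1) (t : Int) else (dp.getD i []).getD t 0) := by
  intro m
  induction m with
  | zero => exact fun _ => ⟨hL, fun _ _ => rfl, hrowlen, fun t ht => by simp⟩
  | succ m ih =>
    intro hm
    rcases ih (by omega) with ⟨ih1, ih2, ih3, ih4⟩
    set E := (List.range m).foldl (fun dp (k : Nat) => aCell nums dp (i : Int) (k : Int)) dp with hE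
    rw [List.range_succ, List.foldl_append, List.foldl_cons, List.foldl_nil]
    have hReq : PySem.List.pyGetD E ((i : Int) - 1) [] = R := hread E ih1 ih2
    have hrow : PySem.List.pyGetD E (i : Int) [] = E.getD i [] := by
      simp [PySem.List.pyGetD_natCast]
    have hnum : PySem.List.pyGetD nums (i : Int) 0 = nums.getD i 0 := by
      simp [PySem.List.pyGetD_natCast]
    have htmpnot : PySem.List.pyGetD R ((m : Int)) 0 = knapT nums i (m : Int) := by
      rw [PySem.List.pyGetD_natCast]
      exact hg m (by omega)
    have hEi : i < E.length := by omega
    have hmrow : m < (E.getD i []).length := by omega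
    by_cases hb : nums.getD i 0 > (m : Int)
    · have hval : knapT nums (i+1) (m : Int) = knapT nums i (m : Int) := by
        rw [knapT_succ, if_pos hb]
      have hstep : aCell nums E (i : Int) (m : Int)
          = E.set i ((E.getD i []).set m (knapT nums i (m : Int))) := by
        unfold aCell
        rw [hReq, htmpnot, hnum, if_pos hb, hrow]
        simp [PySem.List.pySetD_natCast]
      rw [hstep]
      refine ⟨by simpa using ih1, ?_, ?_, ?_⟩
      · intro k hk
        rw [pvGetD_set, if_neg (by intro h; exact hk h.1.symm)]
        exact ih2 k hk
      · rw [pvGetD_set, if_pos ⟨rfl, hEi⟩, List.length_set]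
        exact ih3
      · intro t ht
        rw [pvGetD_set, if_pos ⟨rfl, hEi⟩, pvGetD_set]
        by_cases htm : t = m
        · subst htm
          rw [if_pos ⟨rfl, hmrow⟩, if_pos (by omega), hval]
        · rw [if_neg (by omega), ih4 t ht]
          rw [if_congr (show (t < m + 1) ↔ t < m by omega) rfl rfl]
    · have hble : nums.getD i 0 ≤ (m : Int) := by omega
      have hcast : ((m : Int) - nums.getD i 0) = (((m : Int) - nums.getD i 0).toNat : Int) := by omega
      have htn : ((m : Int) - nums.getD i 0).toNat < w := by omega
      have htmpch : PySem.List.pyGetD R ((m : Int) - nums.getD i 0) 0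
          = knapT nums i ((m : Int) - nums.getD i 0) := by
        rw [hcast, PySem.List.pyGetD_natCast, hg _ htn, ← hcast]
      have hval : knapT nums (i+1) (m : Int)
          = max (knapT nums i ((m : Int) - nums.getD i 0) + nums.getD i 0) (knapT nums i (m : Int)) := by
        rw [knapT_succ, if_neg (by omega)]
      have hstep : aCell nums E (i : Int) (m : Int)
          = E.set i ((E.getD i []).set m (knapT nums (i+1) (m : Int))) := by
        unfold aCell
        rw [hReq, htmpnot, hnum, if_neg (by omega), hrow, htmpch]
        simp only [PySem.List.pySetD_natCast]
        rw [hval]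
      rw [hstep]
      refine ⟨by simpa using ih1, ?_, ?_, ?_⟩
      · intro k hk
        rw [pvGetD_set, if_neg (by intro h; exact hk h.1.symm)]
        exact ih2 k hk
      · rw [pvGetD_set, if_pos ⟨rfl, hEi⟩, List.length_set]
        exact ih3
      · intro t ht
        rw [pvGetD_set, if_pos ⟨rfl, hEi⟩, pvGetD_set]
        by_cases htm : t = m
        · subst htm
          rw [if_pos ⟨rfl, hmrow⟩, if_pos (by omega)]
        · rw [if_neg (by omega), ih4 t ht]
          rw [if_congr (show (t < m + 1) ↔ t < m by omega) rfl rfl]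
lemma passA_self (n0 : Int) (w : Nat) (row0 : List Int)
    (hlen : row0.length = w)
    (hinit : ∀ t, t < w → row0.getD t 0 = init4 n0 t)
    (hn : 0 ≤ n0) :
    ∀ m, m ≤ w →
      ((List.range m).foldl (fun dp (k : Nat) => aCell [n0] dp (0 : Int) (k : Int)) [row0]).length = 1 ∧
      (((List.range m).foldl (fun dp (k : Nat) => aCell [n0] dp (0 : Int) (k : Int)) [row0]).getD 0 []).length = w ∧
      (∀ t, t < w → (((List.range m).foldl (fun dp (k : Nat) => aCell [n0] dp (0 : Int) (k : Int)) [row0]).getD 0 []).getD t 0 =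
          if t < m then selfF n0 t else init4 n0 t) := by
  intro m
  induction m with
  | zero =>
    exact fun _ => ⟨rfl, hlen, fun t ht => by
      simp only [List.range_zero, List.foldl_nil]
      rw [show (([row0] : List (List Int)).getD 0 []) = row0 from rfl, if_neg (by omega)]
      exact hinit t ht⟩
  | succ m ih =>
    intro hm
    rcases ih (by omega) with ⟨ih1, ih2, ih3⟩
    set E := (List.range m).foldl (fun dp (k : Nat) => aCell [n0] dp (0 : Int) (k : Int)) [row0] with hE
    rw [List.range_succ, List.foldl_append, List.foldl_cons, List.foldl_nil]
    -- E is a single row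
    obtain ⟨r, hr⟩ : ∃ r, E = [r] := List.length_eq_one_iff.mp ih1
    have hrget : E.getD 0 [] = r := by rw [hr]; rfl
    have hread : PySem.List.pyGetD E ((0 : Int) - 1) [] = r := by
      rw [hr]; rfl
    have hrow : PySem.List.pyGetD E (0 : Int) [] = r := by rw [hr]; rfl
    have hnum : PySem.List.pyGetD [n0] (0 : Int) 0 = n0 := rfl
    have hrlen : r.length = w := by rw [← hrget]; exact ih2
    have hrval : ∀ t, t < w → r.getD t 0 = if t < m then selfF n0 t else init4 n0 t := by
      intro t ht; rw [← hrget]; exact ih3 t ht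
    have htmpnot : PySem.List.pyGetD r ((m : Int)) 0 = init4 n0 m := by
      rw [PySem.List.pyGetD_natCast, hrval m (by omega), if_neg (by omega)]
    by_cases hb : n0 > (m : Int)
    · have hstep : aCell [n0] E (0 : Int) (m : Int) = [r.set m (init4 n0 m)] := by
        unfold aCell
        rw [hread, htmpnot, hnum, if_pos hb, hrow]
        simp [PySem.List.pySetD_natCast, PySem.List.pySetD_of_nonneg, hr]
      rw [hstep]
      refine ⟨rfl, by simpa using hrlen, ?_⟩
      intro t ht
      show (r.set m (init4 n0 m)).getD t 0 = _
      rw [pvGetD_set]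
      by_cases htm : t = m
      · subst htm
        rw [if_pos ⟨rfl, by omega⟩, if_pos (by omega), selfF, if_pos hb]
      · rw [if_neg (by omega), hrval t ht]
        have : t < m + 1 ↔ t < m := by omega
        rw [if_congr this rfl rfl]
    · have hble : n0 ≤ (m : Int) := by omega
      have hv : ∃ v, aCell [n0] E (0 : Int) (m : Int) = [r.set m v] ∧ v = selfF n0 m := by
        by_cases hz : n0 ≤ 0
        · have hn0 : n0 = 0 := le_antisymm hz hn
          refine ⟨max (init4 n0 m + n0) (init4 n0 m), ?_, ?_⟩
          · unfold aCell
            rw [hread, htmpnot, hnum, if_neg (by omega), hrow]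
            have : PySem.List.pyGetD r ((m : Int) - n0) 0 = init4 n0 m := by
              rw [show (m : Int) - n0 = (m : Int) by omega, htmpnot]
            rw [this]
            simp [PySem.List.pySetD_natCast, PySem.List.pySetD_of_nonneg, hr]
          · rw [selfF, if_neg (by omega), if_pos hz]
        · have h1 : 1 ≤ n0 := by omega
          have hcast : ((m : Int) - n0) = ((m - n0.toNat : Nat) : Int) := by omega
          have htn : m - n0.toNat < m := by omega
          refine ⟨max (selfF n0 (m - n0.toNat) + n0) (init4 n0 m), ?_, ?_⟩
          · unfold aCell
            rw [hread, htmpnot, hnum, if_neg (by omega), hrow]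
            have : PySem.List.pyGetD r ((m : Int) - n0) 0 = selfF n0 (m - n0.toNat) := by
              rw [hcast, PySem.List.pyGetD_natCast, hrval _ (by omega), if_pos htn]
            rw [this]
            simp [PySem.List.pySetD_natCast, PySem.List.pySetD_of_nonneg, hr]
          · conv_rhs => rw [selfF]
            rw [if_neg (by omega), if_neg hz]
      rcases hv with ⟨v, hstep, hvv⟩
      rw [hstep]
      refine ⟨rfl, by simpa using hrlen, ?_⟩
      intro t ht
      show (r.set m v).getD t 0 = _
      rw [pvGetD_set]
      by_cases htm : t = m
      · subst htm
        rw [if_pos ⟨rfl, by omega⟩, if_pos (by omega), hvv]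
      · rw [if_neg (by omega), hrval t ht]
        have : t < m + 1 ↔ t < m := by omega
        rw [if_congr this rfl rfl]
lemma pvMapConst {α : Type} (b : Int) (c : α) :
    (PySem.List.pyRange 0 b 1).map (fun _ => c) = List.replicate b.toNat c := by
  rw [PySem.List.pyRange_one, List.map_map]
  rw [show ((fun (_ : Int) => c) ∘ fun (k : Nat) => ((0:Int) + (k:Int))) = (fun (_ : Nat) => c) from rfl]
  simp [List.map_const']

lemma firstA (nums : List Int) (limit : Int) (len w : Nat)
    (hlen : nums.length = len) (hw : w = (limit + 1).toNat) (hne : 0 < len) :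
    ∀ m, m ≤ w →
      ((List.range m).foldl (fun dp (j : Nat) =>
          if PySem.List.pyGetD nums 0 0 ≤ (j : Int) then
            PySem.List.pySetD dp 0 (PySem.List.pySetD (PySem.List.pyGetD dp 0 []) (j : Int) (PySem.List.pyGetD pyModuleList 0 0))
          else dp) (List.replicate len (List.replicate w (0:Int)))).length = len ∧
      (∀ k, k ≠ 0 → ((List.range m).foldl (fun dp (j : Nat) =>
          if PySem.List.pyGetD nums 0 0 ≤ (j : Int) then
            PySem.List.pySetD dp 0 (PySem.List.pySetD (PySem.List.pyGetD dp 0 []) (j : Int) (PySem.List.pyGetD pyModuleList 0 0))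
          else dp) (List.replicate len (List.replicate w (0:Int)))).getD k []
          = (List.replicate len (List.replicate w (0:Int))).getD k []) ∧
      (((List.range m).foldl (fun dp (j : Nat) =>
          if PySem.List.pyGetD nums 0 0 ≤ (j : Int) then
            PySem.List.pySetD dp 0 (PySem.List.pySetD (PySem.List.pyGetD dp 0 []) (j : Int) (PySem.List.pyGetD pyModuleList 0 0))
          else dp) (List.replicate len (List.replicate w (0:Int)))).getD 0 []).length = w ∧
      (∀ t, t < w → (((List.range m).foldl (fun dp (j : Nat) =>
          if PySem.List.pyGetD nums 0 0 ≤ (j : Int) then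
            PySem.List.pySetD dp 0 (PySem.List.pySetD (PySem.List.pyGetD dp 0 []) (j : Int) (PySem.List.pyGetD pyModuleList 0 0))
          else dp) (List.replicate len (List.replicate w (0:Int)))).getD 0 []).getD t 0
          = if t < m ∧ nums.getD 0 0 ≤ (t : Int) then 4 else 0) := by
  have hmod : PySem.List.pyGetD pyModuleList 0 0 = 4 := rfl
  have hn0 : PySem.List.pyGetD nums 0 0 = nums.getD 0 0 := PySem.List.pyGetD_zero nums 0
  intro m
  induction m with
  | zero =>
    refine fun _ => ⟨by simp, fun _ _ => rfl, by simp [List.getD_replicate, hne], ?_⟩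
    intro t ht
    rw [if_neg (by omega)]
    simp [List.getD_replicate, hne]
  | succ m ih =>
    intro hm
    rcases ih (by omega) with ⟨ih1, ih2, ih3, ih4⟩
    set E := (List.range m).foldl (fun dp (j : Nat) =>
          if PySem.List.pyGetD nums 0 0 ≤ (j : Int) then
            PySem.List.pySetD dp 0 (PySem.List.pySetD (PySem.List.pyGetD dp 0 []) (j : Int) (PySem.List.pyGetD pyModuleList 0 0))
          else dp) (List.replicate len (List.replicate w (0:Int))) with hE
    rw [List.range_succ, List.foldl_append, List.foldl_cons, List.foldl_nil]
    by_cases hc : PySem.List.pyGetD nums 0 0 ≤ (m : Int)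
    · have hstep : (if PySem.List.pyGetD nums 0 0 ≤ ((m : Nat) : Int) then
            PySem.List.pySetD E 0 (PySem.List.pySetD (PySem.List.pyGetD E 0 []) ((m : Nat) : Int) (PySem.List.pyGetD pyModuleList 0 0))
          else E) = E.set 0 ((E.getD 0 []).set m 4) := by
        rw [if_pos hc, hmod, PySem.List.pyGetD_zero]
        have h1 : PySem.List.pySetD (E.getD 0 []) ((m : Nat) : Int) 4 = (E.getD 0 []).set m 4 :=
          PySem.List.pySetD_natCast _ _ _
        rw [h1]
        exact PySem.List.pySetD_of_nonneg _ _ (by norm_num)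
      rw [hstep]
      have hE0 : 0 < E.length := by omega
      refine ⟨by simpa using ih1, ?_, ?_, ?_⟩
      · intro k hk
        rw [pvGetD_set, if_neg (by intro h; exact hk h.1.symm)]
        exact ih2 k hk
      · rw [pvGetD_set, if_pos ⟨rfl, hE0⟩, List.length_set]
        exact ih3
      · intro t ht
        rw [pvGetD_set, if_pos ⟨rfl, hE0⟩, pvGetD_set]
        by_cases htm : t = m
        · subst htm
          rw [if_pos ⟨rfl, by omega⟩, if_pos ⟨by omega, by rwa [hn0] at hc⟩]
        · rw [if_neg (by omega), ih4 t ht]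
          rw [if_congr (show (t < m + 1 ∧ nums.getD 0 0 ≤ (t:Int)) ↔ (t < m ∧ nums.getD 0 0 ≤ (t:Int)) by
            constructor <;> rintro ⟨h1, h2⟩ <;> exact ⟨by omega, h2⟩) rfl rfl]
    · rw [if_neg hc]
      refine ⟨ih1, ih2, ih3, ?_⟩
      intro t ht
      rw [ih4 t ht]
      by_cases htm : t = m
      · subst htm
        rw [if_neg (by omega), if_neg (by rw [hn0] at hc; omega)]
      · rw [if_congr (show (t < m + 1 ∧ nums.getD 0 0 ≤ (t:Int)) ↔ (t < m ∧ nums.getD 0 0 ≤ (t:Int)) by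
            constructor <;> rintro ⟨h1, h2⟩ <;> exact ⟨by omega, h2⟩) rfl rfl]
lemma outerA (nums : List Int) (limit : Int) (len w : Nat)
    (hlen : nums.length = len) (hw : w = (limit + 1).toNat) (h2 : 2 ≤ len)
    (hnn : ∀ x ∈ nums, 0 ≤ x)
    (dp1 : List (List Int))
    (hd1 : dp1.length = len)
    (hrows : ∀ k, k < len → (dp1.getD k []).length = w)
    (hval : ∀ k, k < len → ∀ t, t < w →
        (dp1.getD k []).getD t 0 = if k = 0 then init4 (nums.getD 0 0) (t : Int) else 0) :
    ∀ c, c ≤ len →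
      ((List.range c).foldl (fun dp (i : Nat) =>
          (List.range w).foldl (fun dp (j : Nat) => aCell nums dp (i : Int) (j : Int)) dp) dp1).length = len ∧
      (∀ k, k < len → (((List.range c).foldl (fun dp (i : Nat) =>
          (List.range w).foldl (fun dp (j : Nat) => aCell nums dp (i : Int) (j : Int)) dp) dp1).getD k []).length = w) ∧
      (∀ k, k < len → ∀ t, t < w →
        (((List.range c).foldl (fun dp (i : Nat) =>
          (List.range w).foldl (fun dp (j : Nat) => aCell nums dp (i : Int) (j : Int)) dp) dp1).getD k []).getD t 0 =
          if k < c then knapT nums (k+1) (t : Int)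
          else if k = 0 then init4 (nums.getD 0 0) (t : Int) else 0) := by
  intro c
  induction c with
  | zero =>
    intro _
    simp only [List.range_zero, List.foldl_nil]
    refine ⟨hd1, hrows, ?_⟩
    intro k hk t ht
    rw [if_neg (show ¬ k < 0 by omega), hval k hk t ht]
  | succ c ih =>
    intro hc
    rcases ih (by omega) with ⟨ih1, ih2, ih3⟩
    set E := (List.range c).foldl (fun dp (i : Nat) =>
        (List.range w).foldl (fun dp (j : Nat) => aCell nums dp (i : Int) (j : Int)) dp) dp1 with hE
    rw [List.range_succ, List.foldl_append, List.foldl_cons, List.foldl_nil]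
    have hcl : c < len := by omega
    -- the row A's i-1 read resolves to, and its value
    have hr : ∃ r : Nat, r < len ∧ r ≠ c ∧
        (∀ dp' : List (List Int), dp'.length = len →
          (∀ k, k ≠ c → dp'.getD k [] = E.getD k []) →
          PySem.List.pyGetD dp' ((c : Int) - 1) [] = E.getD r []) ∧
        (∀ t, t < w → (E.getD r []).getD t 0 = knapT nums c (t : Int)) := by
      rcases Nat.eq_zero_or_pos c with rfl | hcpos
      · refine ⟨len - 1, by omega, by omega, ?_, ?_⟩
        · intro dp' h1 h2'
          rw [show ((0 : Nat) : Int) - 1 = -(1 : Int) by norm_num]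
          rw [PySem.List.pyGetD_neg_ofNat dp' 1 [] (by omega) (by omega)]
          have hi : dp'.length - 1 < dp'.length := by omega
          rw [← List.getD_eq_getElem dp' [] hi, h1]
          exact h2' (len - 1) (by omega)
        · intro t ht
          rw [ih3 (len - 1) (by omega) t ht, if_neg (by omega), if_neg (by omega)]
          rfl
      · refine ⟨c - 1, by omega, by omega, ?_, ?_⟩
        · intro dp' h1 h2'
          have : ((c : Nat) : Int) - 1 = (((c - 1 : Nat)) : Int) := by omega
          rw [this, PySem.List.pyGetD_natCast]
          exact h2' (c - 1) (by omega)
        · intro t ht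
          rw [ih3 (c - 1) (by omega) t ht, if_pos (by omega)]
          congr 1
          omega
    rcases hr with ⟨r, hrlen, hrc, hread, hrval⟩
    have hpass := passA_distinct nums w len c E (E.getD r []) ih1 hcl (ih2 c hcl)
      hread hrval (hnn _ (by rw [List.getD_eq_getElem nums 0 (by omega)]; exact List.getElem_mem _)) w le_rfl
    rcases hpass with ⟨hp1, hp2, hp3, hp4⟩
    refine ⟨hp1, ?_, ?_⟩
    · intro k hk
      by_cases hkc : k = c
      · subst hkc; exact hp3
      · rw [hp2 k hkc]; exact ih2 k hk
    · intro k hk t ht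
      by_cases hkc : k = c
      · subst hkc
        rw [hp4 t ht, if_pos ht, if_pos (by omega)]
      · rw [hp2 k hkc, ih3 k hk t ht]
        by_cases hklt : k < c
        · rw [if_pos hklt, if_pos (by omega)]
        · rw [if_neg hklt, if_neg (show ¬ k < c + 1 by omega)]
lemma A_eq_len2 (nums : List Int) (limit : Int)
    (hl : 0 ≤ limit) (hnn : ∀ x ∈ nums, 0 ≤ x) (h2 : 2 ≤ nums.length) :
    find_max_dp nums limit = knapT nums nums.length limit := by
  unfold find_max_dp
  simp only [foldl_pyRange_zero_cast, pvMapConst, Int.toNat_natCast]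
  have hrep : ∀ k, k < nums.length →
      (List.replicate nums.length (List.replicate (limit+1).toNat (0:Int))).getD k []
        = List.replicate (limit+1).toNat (0:Int) := by
    intro k hk
    rw [List.getD_eq_getElem?_getD, List.getElem?_replicate, if_pos hk]
    rfl
  have hrow0 : ∀ t : Nat, (List.replicate (limit+1).toNat (0:Int)).getD t 0 = 0 := by
    intro t
    rw [List.getD_eq_getElem?_getD, List.getElem?_replicate]
    split_ifs <;> rfl
  have hf := firstA nums limit nums.length ((limit+1).toNat) rfl rfl (by omega)
      ((limit+1).toNat) le_rfl
  rcases hf with ⟨hf1, hf2, hf3, hf4⟩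
  have ho := outerA nums limit nums.length ((limit+1).toNat) rfl rfl h2 hnn _ hf1
    (by
      intro k hk
      by_cases hk0 : k = 0
      · subst hk0; exact hf3
      · rw [hf2 k hk0, hrep k hk]
        simp)
    (by
      intro k hk t ht
      by_cases hk0 : k = 0
      · subst hk0
        rw [hf4 t ht, if_pos rfl]
        unfold init4
        rw [if_congr (show (t < (limit+1).toNat ∧ nums.getD 0 0 ≤ (t:Int)) ↔ nums.getD 0 0 ≤ (t:Int)
              from Iff.intro (fun h => h.2) (fun h => ⟨ht, h⟩)) rfl rfl]
      · rw [hf2 k hk0, hrep k hk, if_neg hk0, hrow0])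
    nums.length le_rfl
  rcases ho with ⟨ho1, ho2, ho3⟩
  rw [show ((nums.length : Int) - 1) = (((nums.length - 1 : Nat)) : Int) by omega,
      PySem.List.pyGetD_natCast]
  rw [PySem.List.pyGetD_of_nonneg _ _ hl]
  rw [ho3 (nums.length - 1) (by omega) limit.toNat (by omega), if_pos (by omega)]
  rw [show nums.length - 1 + 1 = nums.length by omega]
  congr 1
  omega

lemma A_eq_len1 (n0 : Int) (limit : Int) (hl : 0 ≤ limit) (hn : 0 ≤ n0) :
    find_max_dp [n0] limit = selfF n0 limit.toNat := by
  unfold find_max_dp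
  simp only [foldl_pyRange_zero_cast, pvMapConst, Int.toNat_natCast, List.length_cons,
    List.length_nil, Nat.zero_add, Int.toNat_one, List.range_one, List.foldl_cons, List.foldl_nil,
    Nat.cast_zero, Nat.cast_one]
  have hf := firstA [n0] limit 1 ((limit+1).toNat) rfl rfl one_pos ((limit+1).toNat) le_rfl
  rcases hf with ⟨hf1, hf2, hf3, hf4⟩
  obtain ⟨row0, hrow⟩ := List.length_eq_one_iff.mp hf1
  rw [hrow] at hf3 hf4
  have hps := passA_self n0 ((limit+1).toNat) row0 (by simpa using hf3)
    (by
      intro t ht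
      have := hf4 t ht
      rw [show (([row0] : List (List Int)).getD 0 []) = row0 from rfl] at this
      rw [this]
      unfold init4
      rw [if_congr (show (t < (limit+1).toNat ∧ ([n0] : List Int).getD 0 0 ≤ (t:Int)) ↔ n0 ≤ (t:Int)
            from Iff.intro (fun h => by simpa using h.2) (fun h => ⟨ht, by simpa using h⟩)) rfl rfl])
    hn ((limit+1).toNat) le_rfl
  rcases hps with ⟨hp1, hp2, hp3⟩
  rw [hrow]
  rw [show ((1 : Int) - 1) = (((0 : Nat)) : Int) by norm_num, PySem.List.pyGetD_natCast]
  rw [PySem.List.pyGetD_of_nonneg _ _ hl]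
  rw [hp3 limit.toNat (by omega), if_pos (by omega)]

lemma knapT_one (n0 limit : Int) (hn : 0 ≤ n0) :
    knapT [n0] 1 limit = if n0 ≤ limit then n0 else 0 := by
  rw [show (1:Nat) = 0 + 1 from rfl, knapT_succ]
  rw [show ([n0] : List Int).getD 0 0 = n0 from rfl]
  by_cases h : n0 > limit
  · rw [if_pos h, if_neg (by omega)]
    rfl
  · rw [if_neg h, if_pos (by omega)]
    rw [show knapT [n0] 0 (limit - n0) = 0 from rfl, show knapT [n0] 0 limit = 0 from rfl]
    omega

lemma selfF_big (n0 : Int) (t : Nat) (h : n0 > (t:Int)) : selfF n0 t = 0 := by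
  rw [selfF, if_pos h]
  unfold init4
  rw [if_neg (by omega)]

lemma selfF_ge4 (n0 : Int) (t : Nat) (h : n0 ≤ (t:Int)) : 4 ≤ selfF n0 t := by
  rw [selfF, if_neg (by omega)]
  have h4 : init4 n0 t = 4 := by unfold init4; rw [if_pos h]
  by_cases hz : n0 ≤ 0
  · rw [if_pos hz, h4]
    omega
  · rw [if_neg hz, h4]
    omega

lemma selfF_mid (n0 : Int) (t : Nat) (hn4 : 4 ≤ n0) (hle : n0 ≤ (t:Int)) (hlt : (t:Int) < 2*n0) :
    selfF n0 t = n0 := by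
  rw [selfF, if_neg (by omega), if_neg (by omega)]
  rw [selfF_big n0 _ (by omega)]
  unfold init4
  rw [if_pos hle]
  omega

lemma selfF_2n (n0 : Int) (t : Nat) (hn4 : 4 ≤ n0) (h2 : 2*n0 ≤ (t:Int)) :
    n0 + 4 ≤ selfF n0 t := by
  rw [selfF, if_neg (by omega), if_neg (by omega)]
  have h4 : 4 ≤ selfF n0 (t - n0.toNat) := selfF_ge4 n0 _ (by omega)
  omega

lemma B_one (n0 limit : Int) (hn : 0 ≤ n0) (hl : 0 ≤ limit) (hnn : ∀ x ∈ ([n0] : List Int), 0 ≤ x) :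
    find_max_dp_alt [n0] limit = if n0 ≤ limit then n0 else 0 := by
  rw [B_eq_knapT hnn hl, show ([n0] : List Int).length = 1 from rfl, knapT_one n0 limit hn]


-- ===== VERDICT (by name: the statement is the Claim_ definition above) =====
theorem find_max_dp_spec : Claim_unchanged_find_max_dp := by
  intro nums limit hdom hpre
  intro hnd
  rcases hpre with ⟨hne, hl, hnn⟩
  have hcases : nums.length = 0 ∨ nums.length = 1 ∨ 2 ≤ nums.length := by omega
  rcases hcases with h0 | h1 | h2
  · exact absurd (List.length_eq_zero_iff.mp h0) hne
  · obtain ⟨n0, rfl⟩ := List.length_eq_one_iff.mp h1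
    have hn0 : (0:Int) ≤ n0 := hnn n0 (by simp)
    rw [A_eq_len1 n0 limit hl hn0, B_one n0 limit hn0 hl hnn]
    have hd' : ¬(n0 ≤ limit ∧ (n0 < 4 ∨ 2*n0 ≤ limit)) := by
      intro hc
      exact hnd ⟨rfl, by simpa using hc.1, by simpa using hc.2⟩
    by_cases hc1 : n0 ≤ limit
    · rw [if_pos hc1]
      exact selfF_mid n0 limit.toNat (by omega) (by omega) (by omega)
    · rw [if_neg hc1]
      exact selfF_big n0 limit.toNat (by omega)
  · rw [A_eq_len2 nums limit hl hnn h2, B_eq_knapT hnn hl]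

theorem find_max_dp_tight : Claim_exact_find_max_dp := by
  intro nums limit hdom hpre hd
  rcases hpre with ⟨hne, hl, hnn⟩
  rcases hd with ⟨hlen1, hdle, hdor⟩
  obtain ⟨n0, rfl⟩ := List.length_eq_one_iff.mp hlen1
  have hn0 : (0:Int) ≤ n0 := hnn n0 (by simp)
  have hdle' : n0 ≤ limit := by simpa using hdle
  have hdor' : n0 < 4 ∨ 2*n0 ≤ limit := by simpa using hdor
  rw [A_eq_len1 n0 limit hl hn0, B_one n0 limit hn0 hl hnn, if_pos hdle']
  by_cases h4 : 4 ≤ n0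
  · rcases hdor' with hlt4 | h2n
    · omega
    · have := selfF_2n n0 limit.toNat h4 (by omega)
      omega
  · have := selfF_ge4 n0 limit.toNat (by omega)
    omega

theorem find_max_dp_changed : Claim_changed_find_max_dp := by unfold Claim_changed_find_max_dp; decide
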